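-- pv_equiv track=rewrite | github.com/rjchicago/cman | app/src/cman.py | find_default_spawns
-- ===== SOURCE A (Python) =====
-- def find_default_spawns(LEVEL):
--     """Find spawn points marked with C (cman) and M (ghosts), replace with spaces"""
--     H = len(LEVEL); W = len(LEVEL[0])
--
--     # Convert LEVEL to mutable list of lists
--     level_grid = [list(row) for row in LEVEL]
--
--     # Find C marker for cman
--     pac = None
--     for y in range(H):
--         for x in range(W):
--             if level_grid[y][x] == 'C':
--                 pac = (x, y)
--                 level_grid[y][x] = ' '  # Replace C with space
--                 break
--         if pac: break
--
--     # Find M markers for ghosts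
--     ghost_candidates = []
--     for y in range(H):
--         for x in range(W):
--             if level_grid[y][x] == 'M':
--                 ghost_candidates.append((x, y))
--                 level_grid[y][x] = ' '  # Replace M with space
--
--     # Update LEVEL back to list of strings
--     for y in range(H):
--         LEVEL[y] = ''.join(level_grid[y])
--
--     # Fallbacks if markers not found
--     if pac is None:
--         for y in range(H//2, H):
--             for x in range(W):
--                 if LEVEL[y][x] in ('.','o',' '):
--                     pac = (x, y); break
--             if pac: break
--         if pac is None: pac = (1, 1)
--
--
--
--     # Use only the ghosts found (don't force 4)
--     ghosts = ghost_candidates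
--
--     # Use ghost starting positions as scatter targets
--     scatters = ghost_candidates
--     return pac, ghosts, scatters
-- ===== SOURCE B (Python) =====
-- # B: single fused pass over the rows as strings (no list-of-lists grid, no writeback);
-- # the fallback scans the ORIGINAL rows with 'M' added to the acceptable characters,
-- # which is exactly what A's space-replaced grid makes true.
-- # Note: A mutates LEVEL in place (markers cleared); B does not mutate -- the
-- # equivalence claimed is about the return value only.
-- def find_default_spawns(LEVEL):
--     H = len(LEVEL)
--     W = len(LEVEL[0])
--     pac = None
--     ghosts = []
--     for y in range(H):
--         cells = LEVEL[y][:W]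
--         for x in range(len(cells)):
--             ch = cells[x]
--             if ch == 'C' and pac is None:
--                 pac = (x, y)
--             elif ch == 'M':
--                 ghosts.append((x, y))
--     if pac is None:
--         for y in range(H // 2, H):
--             cells = LEVEL[y][:W]
--             for x in range(len(cells)):
--                 if cells[x] in ('.', 'o', ' ', 'M'):
--                     pac = (x, y)
--                     break
--             if pac:
--                 break
--         if pac is None:
--             pac = (1, 1)
--     return pac, ghosts, ghosts
-- ===== Notes on version B (the rewrite author's own statement) =====
-- stated objective: simpler
-- what changed: Drops A's mutable list-of-lists grid, its three separate grid passes (C-search with break, M-search with in-place clearing, string writeback) and its fallback over the mutated strings; B makes one fused pass over the rows as immutable strings and runs the fallback over the original rows with 'M' added to the accepted characters (which is exactly what A's space-replacement makes true).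
import Mathlib
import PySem

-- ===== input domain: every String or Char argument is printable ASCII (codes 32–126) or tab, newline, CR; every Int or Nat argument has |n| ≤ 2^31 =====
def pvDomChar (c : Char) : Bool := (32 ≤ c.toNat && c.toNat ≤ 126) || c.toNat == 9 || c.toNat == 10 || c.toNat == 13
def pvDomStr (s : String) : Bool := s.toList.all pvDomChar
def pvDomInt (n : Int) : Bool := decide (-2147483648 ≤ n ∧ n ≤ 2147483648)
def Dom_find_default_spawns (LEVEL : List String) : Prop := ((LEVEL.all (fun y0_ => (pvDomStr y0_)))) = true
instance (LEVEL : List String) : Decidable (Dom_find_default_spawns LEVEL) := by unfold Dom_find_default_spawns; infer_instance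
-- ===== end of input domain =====

-- B replaces A's mutable grid and three passes by one fused pass over the rows; A mutates
-- LEVEL in place (markers cleared), B does not: the equivalence claimed is about the return
-- value only.

-- ===== PORT A =====
-- for x in range(W): if level_grid[y][x] == 'C' → first such x (row indexing with a
-- nonnegative in-range index is List.getElem?; out of range is excluded by Pre_)
def pvAFindCRow (row : List Char) (W : Nat) : Option Nat :=
  (List.range W).find? (fun x => row[x]?.getD ' ' == 'C')

-- outer y-loop with break once pac is set ((x,y) tuples are truthy)
def pvAFindC : List (List Char) → Nat → Nat → Option (Nat × Nat)
  | [], _, _ => none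
  | r :: rs, W, y =>
    match pvAFindCRow r W with
    | some x => some (x, y)
    | none => pvAFindC rs W (y + 1)

-- for x in range(W): collect x with grid[y][x]=='M', clearing each found cell in place
def pvAGhostRow (row : List Char) (W : Nat) : List Nat × List Char :=
  (List.range W).foldl
    (fun acc x => if acc.2[x]?.getD ' ' == 'M' then (acc.1 ++ [x], acc.2.set x ' ') else acc)
    ([], row)

-- ghost y-loop; also returns the mutated grid (the Python writeback joins it into LEVEL)
def pvAGhosts : List (List Char) → Nat → Nat → List (Nat × Nat) × List (List Char)
  | [], _, _ => ([], [])
  | r :: rs, W, y =>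
    let p := pvAGhostRow r W
    let q := pvAGhosts rs W (y + 1)
    (p.1.map (fun x => (x, y)) ++ q.1, p.2 :: q.2)

-- fallback inner loop: LEVEL[y][x] in ('.','o',' '); indexing the joined string equals
-- indexing the char row, so the port reads the grid row directly (exact)
def pvAFallbackRow (row : List Char) (W : Nat) : Option Nat :=
  (List.range W).find? (fun x =>
    row[x]?.getD '?' == '.' || row[x]?.getD '?' == 'o' || row[x]?.getD '?' == ' ')

def pvAFallback : List (List Char) → Nat → Nat → Option (Nat × Nat)
  | [], _, _ => none
  | r :: rs, W, y =>
    match pvAFallbackRow r W with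
    | some x => some (x, y)
    | none => pvAFallback rs W (y + 1)

def find_default_spawns (LEVEL : List String) : (Int × Int) × (List (Int × Int)) × (List (Int × Int)) :=
  let H := LEVEL.length
  let W := ((LEVEL.headD "").toList).length   -- len(LEVEL[0]); Python raises on [], excluded by Pre_
  let grid := LEVEL.map String.toList
  let pac0 := pvAFindC grid W 0
  let grid1 := match pac0 with
    | some (x, y) => grid.set y ((grid[y]?.getD []).set x ' ')   -- level_grid[y][x] = ' '
    | none => grid
  let g := pvAGhosts grid1 W 0
  let pac : Nat × Nat :=
    match pac0 with
    | some p => p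
    | none =>
      match pvAFallback (g.2.drop (H / 2)) W (H / 2) with   -- for y in range(H//2, H) over written-back LEVEL
      | some p => p
      | none => (1, 1)
  (((pac.1 : Int), (pac.2 : Int)),
   g.1.map (fun p => ((p.1 : Int), (p.2 : Int))),
   g.1.map (fun p => ((p.1 : Int), (p.2 : Int))))

-- ===== PORT B =====
-- fused per-row loop of Source B: ch=='C' and pac is None → set pac; elif ch=='M' → append ghost
def pvBRow (cells : List Char) (y : Nat) (st : Option (Nat × Nat) × List (Nat × Nat)) :
    Option (Nat × Nat) × List (Nat × Nat) :=
  (List.range cells.length).foldl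
    (fun st x =>
      if cells[x]?.getD ' ' == 'C' && st.1.isNone then (some (x, y), st.2)
      else if cells[x]?.getD ' ' == 'M' then (st.1, st.2 ++ [(x, y)])
      else st)
    st

-- for y in range(H): cells = LEVEL[y][:W]
def pvBScan : List String → Nat → Nat → (Option (Nat × Nat) × List (Nat × Nat)) → (Option (Nat × Nat) × List (Nat × Nat))
  | [], _, _, st => st
  | r :: rs, W, y, st => pvBScan rs W (y + 1) (pvBRow (r.toList.take W) y st)

-- fallback of Source B over the ORIGINAL rows, with 'M' among the accepted characters
def pvBFallbackRow (cells : List Char) : Option Nat :=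
  (List.range cells.length).find? (fun x =>
    cells[x]?.getD ' ' == '.' || cells[x]?.getD ' ' == 'o' ||
    cells[x]?.getD ' ' == ' ' || cells[x]?.getD ' ' == 'M')

def pvBFallback : List String → Nat → Nat → Option (Nat × Nat)
  | [], _, _ => none
  | r :: rs, W, y =>
    match pvBFallbackRow (r.toList.take W) with
    | some x => some (x, y)
    | none => pvBFallback rs W (y + 1)

def find_default_spawns_alt (LEVEL : List String) : (Int × Int) × (List (Int × Int)) × (List (Int × Int)) :=
  let H := LEVEL.length
  let W := ((LEVEL.headD "").toList).length
  let st := pvBScan LEVEL W 0 (none, [])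
  let pac : Nat × Nat :=
    match st.1 with
    | some p => p
    | none =>
      match pvBFallback (LEVEL.drop (H / 2)) W (H / 2) with
      | some p => p
      | none => (1, 1)
  (((pac.1 : Int), (pac.2 : Int)),
   st.2.map (fun p => ((p.1 : Int), (p.2 : Int))),
   st.2.map (fun p => ((p.1 : Int), (p.2 : Int))))

-- ===== PRECONDITION & SPEC =====
-- Pre_ excludes exactly the inputs where A raises IndexError: the empty LEVEL
-- (len(LEVEL[0])) and ragged levels with some row shorter than row 0 (every row is
-- indexed at all x < W).
def Pre_find_default_spawns (LEVEL : List String) : Prop :=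
  LEVEL ≠ [] ∧ ∀ r ∈ LEVEL, ((LEVEL.headD "").toList).length ≤ r.toList.length
instance (LEVEL : List String) : Decidable (Pre_find_default_spawns LEVEL) := by
  unfold Pre_find_default_spawns; infer_instance

def pvWitness_find_default_spawns : List String := ["#C#", "M.M", "###"]

def Spec_find_default_spawns (LEVEL : List String) (out : (Int × Int) × (List (Int × Int)) × (List (Int × Int))) : Prop := out = find_default_spawns_alt LEVEL
instance (LEVEL : List String) (out : (Int × Int) × (List (Int × Int)) × (List (Int × Int))) : Decidable (Spec_find_default_spawns LEVEL out) := by unfold Spec_find_default_spawns; infer_instance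

-- ===== CLAIM (what is proved, stated in full; the proofs are below) =====
def Claim_equal_find_default_spawns : Prop := ∀ (LEVEL : List String), Dom_find_default_spawns LEVEL → Pre_find_default_spawns LEVEL → Spec_find_default_spawns LEVEL (find_default_spawns LEVEL)

-- ===== LEMMAS AND PROOFS =====

theorem pv_find?_congr {α : Type} (l : List α) (p q : α → Bool)
    (h : ∀ a ∈ l, p a = q a) : l.find? p = l.find? q := by
  induction l with
  | nil => rfl
  | cons a l ih =>
    simp only [List.find?_cons]
    rw [h a (by simp)]
    cases q a with
    | true => rfl
    | false => exact ih fun a ha => h a (by simp [ha])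

-- B's fused row loop = (pac kept, or first 'C'; ghosts extended by the 'M' positions)
theorem pvBRow_eq (cells : List Char) (y : Nat) (p : Option (Nat × Nat)) (g : List (Nat × Nat)) :
    pvBRow cells y (p, g) =
      (p.or (((List.range cells.length).find? (fun x => cells[x]?.getD ' ' == 'C')).map (fun x => (x, y))),
       g ++ ((List.range cells.length).filter (fun x => cells[x]?.getD ' ' == 'M')).map (fun x => (x, y))) := by
  unfold pvBRow
  generalize cells.length = n
  induction n generalizing p g with
  | zero => simp
  | succ n ih =>
    rw [List.range_succ, List.foldl_append, List.find?_append, List.filter_append, ih p g]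
    simp only [List.foldl_cons, List.foldl_nil, List.find?_cons, List.find?_nil,
      List.filter_cons, List.filter_nil]
    cases hC : cells[n]?.getD ' ' == 'C' with
    | true =>
      have hM : (cells[n]?.getD ' ' == 'M') = false := by
        rw [beq_iff_eq] at hC; rw [hC]; decide
      cases p <;> cases h1 : (List.range n).find? (fun x => cells[x]?.getD ' ' == 'C') <;>
        simp_all [Option.or]
    | false =>
      cases hM : cells[n]?.getD ' ' == 'M' <;>
        cases p <;> cases h1 : (List.range n).find? (fun x => cells[x]?.getD ' ' == 'C') <;>
          simp_all [Option.or]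

-- A's ghost row loop: collected positions = the 'M' filter; the row gets its 'M' cells
-- (below n) cleared and nothing else changes
theorem pvAGhostRow_spec (r : List Char) (n : Nat) (hn : n ≤ r.length) :
    (pvAGhostRow r n).1 = (List.range n).filter (fun x => r[x]?.getD ' ' == 'M') ∧
    (pvAGhostRow r n).2.length = r.length ∧
    ∀ x : Nat, (pvAGhostRow r n).2[x]? =
      if x < n ∧ r[x]?.getD ' ' == 'M' then some ' ' else r[x]? := by
  unfold pvAGhostRow
  induction n with
  | zero => simp
  | succ n ih =>
    obtain ⟨ih1, ih2, ih3⟩ := ih (by omega)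
    rw [List.range_succ, List.foldl_append, List.filter_append]
    simp only [List.foldl_cons, List.foldl_nil, List.filter_cons, List.filter_nil]
    set F := (List.range n).foldl
      (fun acc x => if acc.2[x]?.getD ' ' == 'M' then (acc.1 ++ [x], acc.2.set x ' ') else acc)
      ([], r) with hF
    have hq : F.2[n]? = r[n]? := by rw [ih3 n]; simp
    cases hM : r[n]?.getD ' ' == 'M' with
    | true =>
      rw [if_pos (by rw [hq]; exact hM)]
      refine ⟨by simp [ih1], by simp [ih2], ?_⟩
      intro x
      by_cases hx : x = n
      · subst hx
        rw [List.getElem?_set_self (by rw [ih2]; omega)]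
        simp [hM]
      · rw [List.getElem?_set_ne (fun h => hx h.symm), ih3 x]
        simp only [show (x < n + 1) ↔ (x < n) from by omega]
    | false =>
      rw [if_neg (by rw [hq, hM]; simp)]
      refine ⟨by simp [ih1], ih2, ?_⟩
      intro x
      rw [ih3 x]
      by_cases hx : x = n
      · subst hx; simp [hM]
      · simp only [show (x < n + 1) ↔ (x < n) from by omega]

-- the grid A writes back = each row processed by the ghost-row loop (independent of y)
theorem pvAGhosts_snd (rows : List (List Char)) (W : Nat) :
    ∀ y, (pvAGhosts rows W y).2 = rows.map (fun r => (pvAGhostRow r W).2) := by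
  induction rows with
  | nil => intro y; simp [pvAGhosts]
  | cons r rs ih => intro y; simp [pvAGhosts, ih (y + 1)]

-- B's slicing r[:W] reads the same cells A's bounded index loop reads
theorem pv_take_getD (r : List Char) (W x : Nat) (hx : x < W) (d : Char) :
    (r.take W)[x]?.getD d = r[x]?.getD d := by
  rw [List.getElem?_take, if_pos hx]

theorem pv_take_len (r : List Char) (W : Nat) (h : W ≤ r.length) :
    (r.take W).length = W := by
  simp [List.length_take, Nat.min_eq_left h]

-- B's single scan = A's C-search followed by A's ghost collection (on the unmutated grid)
theorem pvBScan_spec (L : List String) (W : Nat) (hW : ∀ r ∈ L, W ≤ r.toList.length) :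
    ∀ (y : Nat) (p : Option (Nat × Nat)) (g : List (Nat × Nat)),
    pvBScan L W y (p, g) =
      (p.or (pvAFindC (L.map String.toList) W y),
       g ++ (pvAGhosts (L.map String.toList) W y).1) := by
  induction L with
  | nil => intro y p g; simp [pvBScan, pvAFindC, pvAGhosts]
  | cons r rs ih =>
    intro y p g
    have hr : W ≤ r.toList.length := hW r (by simp)
    have hlen : (r.toList.take W).length = W := pv_take_len _ _ hr
    have hfind : (List.range (r.toList.take W).length).find?
        (fun x => (r.toList.take W)[x]?.getD ' ' == 'C') = pvAFindCRow r.toList W := by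
      rw [hlen]
      exact pv_find?_congr _ _ _ (fun x hx =>
        by rw [pv_take_getD r.toList W x (List.mem_range.mp hx)])
    have hfilt : (List.range (r.toList.take W).length).filter
        (fun x => (r.toList.take W)[x]?.getD ' ' == 'M') = (pvAGhostRow r.toList W).1 := by
      rw [hlen, (pvAGhostRow_spec r.toList W hr).1]
      exact List.filter_congr (fun x hx =>
        by rw [pv_take_getD r.toList W x (List.mem_range.mp hx)])
    show pvBScan rs W (y + 1) (pvBRow (r.toList.take W) y (p, g)) = _
    rw [pvBRow_eq, hfind, hfilt,
      ih (fun s hs => hW s (by simp [hs])) (y + 1) _ _]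
    simp only [List.map_cons]
    refine Prod.ext_iff.mpr ⟨?_, ?_⟩
    · show (p.or ((pvAFindCRow r.toList W).map fun x => (x, y))).or _ =
        p.or (pvAFindC (r.toList :: rs.map String.toList) W y)
      cases hc : pvAFindCRow r.toList W <;>
        cases p <;> simp [pvAFindC, hc, Option.or]
    · show g ++ _ ++ _ = g ++ (pvAGhosts (r.toList :: rs.map String.toList) W y).1
      simp [pvAGhosts, List.append_assoc]

-- fallback per row: A on the M-cleared row (chars '.','o',' ') = B on the original slice
-- (chars '.','o',' ','M')
theorem pvFallbackRow_eq (r : List Char) (W : Nat) (hr : W ≤ r.length) :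
    pvAFallbackRow (pvAGhostRow r W).2 W = pvBFallbackRow (r.take W) := by
  unfold pvAFallbackRow pvBFallbackRow
  rw [pv_take_len _ _ hr]
  apply pv_find?_congr
  intro x hx
  have hxW : x < W := List.mem_range.mp hx
  have hxr : x < r.length := by omega
  have hsome : r[x]? = some (r[x]'hxr) := List.getElem?_eq_getElem hxr
  rw [(pvAGhostRow_spec r W hr).2.2 x, List.getElem?_take, if_pos hxW, hsome]
  by_cases hM : r[x]'hxr = 'M'
  · rw [if_pos ⟨hxW, by simp [hM]⟩]
    simp [hM]
  · rw [if_neg (by simp [hM])]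
    simp only [Option.getD_some]
    have : (r[x]'hxr == 'M') = false := by simp [hM]
    simp [this]

-- whole fallback scan
theorem pvFallback_eq (L : List String) (W : Nat) (hW : ∀ r ∈ L, W ≤ r.toList.length) :
    ∀ y, pvAFallback ((L.map String.toList).map (fun r => (pvAGhostRow r W).2)) W y =
      pvBFallback L W y := by
  induction L with
  | nil => intro y; simp [pvAFallback, pvBFallback]
  | cons r rs ih =>
    intro y
    simp only [List.map_cons]
    show (match pvAFallbackRow (pvAGhostRow r.toList W).2 W with
      | some x => some (x, y)
      | none => pvAFallback ((rs.map String.toList).map (fun r => (pvAGhostRow r W).2)) W (y + 1)) = _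
    rw [pvFallbackRow_eq r.toList W (hW r (by simp)), ih (fun s hs => hW s (by simp [hs]))]
    rfl

-- where the C-search succeeds: which row it hit and that its cell really holds 'C'
theorem pvAFindC_found (rows : List (List Char)) (W : Nat) :
    ∀ (y x y' : Nat), pvAFindC rows W y = some (x, y') →
      ∃ k r, rows[k]? = some r ∧ y' = y + k ∧ pvAFindCRow r W = some x := by
  induction rows with
  | nil => intro y x y' h; simp [pvAFindC] at h
  | cons r rs ih =>
    intro y x y' h
    unfold pvAFindC at h
    cases hc : pvAFindCRow r W with
    | some x0 =>
      rw [hc] at h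
      simp only [Option.some.injEq, Prod.mk.injEq] at h
      exact ⟨0, r, by simp, by omega, by rw [hc, h.1]⟩
    | none =>
      rw [hc] at h
      obtain ⟨k, s, hk, hy, hrow⟩ := ih (y + 1) x y' h
      exact ⟨k + 1, s, by simpa using hk, by omega, hrow⟩

-- clearing the found 'C' cell does not change which cells are 'M'
theorem pvAGhostRow_fst_set (r : List Char) (x W : Nat) (hr : W ≤ r.length)
    (hC : (r[x]?.getD ' ' == 'C') = true) :
    (pvAGhostRow (r.set x ' ') W).1 = (pvAGhostRow r W).1 := by
  have hx : r[x]? = some 'C' := by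
    cases h : r[x]? with
    | none => rw [h] at hC; simp at hC
    | some c => rw [h] at hC; simp at hC; rw [hC]
  have hxr : x < r.length := by
    by_contra hcon
    rw [List.getElem?_eq_none (by omega)] at hx; cases hx
  rw [(pvAGhostRow_spec (r.set x ' ') W (by simpa using hr)).1, (pvAGhostRow_spec r W hr).1]
  apply List.filter_congr
  intro i _
  by_cases hi : i = x
  · subst hi
    rw [List.getElem?_set_self hxr, hx]
    decide
  · rw [List.getElem?_set_ne (fun h => hi h.symm)]

-- replacing one row by a row with the same 'M' positions leaves the ghost list unchanged
theorem pvAGhosts_fst_set (rows : List (List Char)) (W : Nat) :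
    ∀ (k : Nat) (r' : List Char) (y : Nat),
      (pvAGhostRow r' W).1 = (pvAGhostRow (rows[k]?.getD []) W).1 →
      (pvAGhosts (rows.set k r') W y).1 = (pvAGhosts rows W y).1 := by
  induction rows with
  | nil => intro k r' y _; simp
  | cons r rs ih =>
    intro k r' y h
    cases k with
    | zero =>
      simp only [List.set_cons_zero]
      show ((pvAGhostRow r' W).1.map _ ++ _) = ((pvAGhostRow r W).1.map _ ++ _)
      simp only [List.getElem?_cons_zero, Option.getD_some] at h
      rw [h]
    | succ k =>
      simp only [List.set_cons_succ]
      show ((pvAGhostRow r W).1.map _ ++ (pvAGhosts (rs.set k r') W (y+1)).1) = _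
      rw [ih k r' (y + 1) (by simpa using h)]
      rfl

-- the assembled equivalence
theorem pv_main (LEVEL : List String) (hpre : Pre_find_default_spawns LEVEL) :
    find_default_spawns LEVEL = find_default_spawns_alt LEVEL := by
  obtain ⟨hne, hlen⟩ := hpre
  unfold find_default_spawns find_default_spawns_alt
  dsimp only
  rw [pvBScan_spec LEVEL _ hlen 0 none []]
  simp only [Option.none_or, List.nil_append]
  cases hp : pvAFindC (LEVEL.map String.toList) ((LEVEL.headD "").toList).length 0 with
  | some p =>
    obtain ⟨x, y'⟩ := p
    dsimp only
    obtain ⟨k, r, hk, hy, hrow⟩ :=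
      pvAFindC_found (LEVEL.map String.toList) ((LEVEL.headD "").toList).length 0 x y' hp
    have hky : k = y' := by omega
    subst hky
    have hrW : ((LEVEL.headD "").toList).length ≤ r.length := by
      have hmem := List.mem_of_getElem? hk
      obtain ⟨s, hs, rfl⟩ := List.mem_map.mp hmem
      exact hlen s hs
    have hgr : (LEVEL.map String.toList)[k]?.getD [] = r := by rw [hk]; rfl
    unfold pvAFindCRow at hrow
    have hC := List.find?_some hrow
    rw [pvAGhosts_fst_set (LEVEL.map String.toList) _ k _ 0
      (by rw [hgr]; exact pvAGhostRow_fst_set r x _ hrW hC)]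
  | none =>
    dsimp only
    rw [pvAGhosts_snd (LEVEL.map String.toList) _ 0]
    rw [← List.map_drop, ← List.map_drop,
      pvFallback_eq (LEVEL.drop (LEVEL.length / 2)) _
        (fun r hr => hlen r (List.mem_of_mem_drop hr)) (LEVEL.length / 2)]

-- ===== VERDICT (by name: the statement is the Claim_ definition above) =====
theorem find_default_spawns_spec : Claim_equal_find_default_spawns := by
  intro LEVEL _ hpre
  unfold Spec_find_default_spawns
  exact pv_main LEVEL hpre
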